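-- pv_equiv track=rewrite | github.com/kbawa919/vehicle-matcher | app/services/matcher.py | _resolve_best_match
-- ===== SOURCE A (Python) =====
-- from typing import List, Dict
--
-- def _resolve_best_match(potential_matches: List[Dict]) -> Dict:
--     """
--     Determine the best match from potential candidates.
--
--     :param potential_matches: List of candidate matches
--     :return: tuple: (best_match_dict, has_tie_flag)
--         - best_match_dict: The selected match with highest score/listings
--         - has_tie_flag: True if there was a score tie that was broken
--     """
--     if not potential_matches:
--         return None
--
--     # Find the highest score
--     max_score = max(match['score'] for match in potential_matches)
--
--     # Filter matches with the highest score
--     best_scoring = [match for match in potential_matches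
--                     if match['score'] == max_score]
--
--     # If only one match with this score, return it
--     if len(best_scoring) == 1:
--         return best_scoring[0], False
--
--     # Otherwise use listing count as tiebreaker
--     return max(best_scoring, key=lambda x: x['listing_count']), True
-- ===== SOURCE B (Python) =====
-- def _resolve_best_match(potential_matches):
--     if not potential_matches:
--         return None
--     # stable descending sort by score: the top-score candidates form a prefix
--     # in their original order
--     ranked = sorted(potential_matches, key=lambda m: m['score'], reverse=True)
--     top = ranked[0]['score']
--     k = 1
--     while k < len(ranked) and ranked[k]['score'] == top:
--         k += 1
--     if k == 1:
--         return ranked[0], False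
--     # stable descending sort by listing_count: first element = first candidate
--     # attaining the maximal listing count, exactly max(..., key=...)
--     return sorted(ranked[:k], key=lambda x: x['listing_count'], reverse=True)[0], True
-- ===== Notes on version B (the rewrite author's own statement) =====
-- stated objective: alternative
-- what changed: Replaces A's max-scan/filter/conditional-max structure by a sort-based algorithm: one stable descending sort by score makes the top-score candidates a prefix (walked with a while loop to get the tie count), and on a tie a second stable descending sort of that prefix by listing_count makes its first element the winner; no best_scoring filter list and no max() calls.
import Mathlib
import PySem

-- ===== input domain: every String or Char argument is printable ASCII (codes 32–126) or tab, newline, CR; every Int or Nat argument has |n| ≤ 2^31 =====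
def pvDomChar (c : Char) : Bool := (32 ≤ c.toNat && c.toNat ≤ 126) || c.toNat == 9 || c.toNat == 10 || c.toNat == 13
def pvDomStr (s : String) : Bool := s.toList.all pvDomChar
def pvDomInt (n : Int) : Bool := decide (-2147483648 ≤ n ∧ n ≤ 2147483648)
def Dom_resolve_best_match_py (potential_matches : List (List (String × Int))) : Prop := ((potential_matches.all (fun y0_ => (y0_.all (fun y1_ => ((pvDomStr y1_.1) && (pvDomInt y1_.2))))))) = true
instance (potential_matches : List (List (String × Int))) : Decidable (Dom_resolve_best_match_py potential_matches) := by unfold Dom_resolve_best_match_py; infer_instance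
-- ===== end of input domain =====

-- B replaces A's max-scan / filter / conditional max by a sort-based algorithm:
-- a stable descending sort by score (top-score candidates become a prefix, walked to
-- count the tie) and, on a tie, a second stable descending sort of that prefix by
-- listing_count whose first element is the winner; same return value, no speed claim.


-- ===== PORT A =====
-- dict access m['score'] / m['listing_count'] on an association list: first match
-- (exact under Pre_, which guarantees the key is present; the default 0 is never read there)
def pvScore (m : List (String × Int)) : Int := (m.lookup "score").getD 0
def pvLc (m : List (String × Int)) : Int := (m.lookup "listing_count").getD 0

def resolve_best_match_py (potential_matches : List (List (String × Int))) : Option ((List (String × Int)) × Bool) :=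
  if potential_matches.isEmpty then none
  else
    -- max_score = max(match['score'] for match in potential_matches)
    let max_score := match PySem.List.max? (potential_matches.map (fun m => pvScore m)) (fun v => v) with
      | some v => v
      | none => 0   -- unreachable: the list is nonempty
    -- best_scoring = [match for match in potential_matches if match['score'] == max_score]
    let best_scoring := potential_matches.filter (fun m => pvScore m == max_score)
    if best_scoring.length = 1 then
      some (best_scoring.headD [], false)
    else
      -- max(best_scoring, key=lambda x: x['listing_count'])
      match PySem.List.max? best_scoring (fun x => pvLc x) with
      | some b => some (b, true)
      | none => none   -- unreachable: best_scoring is nonempty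

-- ===== PORT B =====
-- the while loop: k = 1; while k < len(ranked) and ranked[k]['score'] == top: k += 1
-- counted as the length of the prefix of the remaining list whose score equals top
def pvCountTop (top : Int) : List (List (String × Int)) → Nat
  | [] => 0
  | m :: rest => if pvScore m == top then 1 + pvCountTop top rest else 0

def resolve_best_match_py_alt (potential_matches : List (List (String × Int))) : Option ((List (String × Int)) × Bool) :=
  match potential_matches with
  | [] => none
  | _ :: _ =>
    -- ranked = sorted(potential_matches, key=lambda m: m['score'], reverse=True)
    match PySem.List.sorted potential_matches (fun m => pvScore m) true with
    | [] => none   -- unreachable: sorted of a nonempty list is nonempty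
    | r0 :: rtail =>
      let top := pvScore r0            -- ranked[0]['score']
      let k := 1 + pvCountTop top rtail
      if k = 1 then some (r0, false)   -- return ranked[0], False
      else
        -- sorted(ranked[:k], key=lambda x: x['listing_count'], reverse=True)[0]
        match PySem.List.sorted ((r0 :: rtail).take k) (fun x => pvLc x) true with
        | [] => none   -- unreachable: the slice is nonempty
        | b :: _ => some (b, true)

-- ===== PRECONDITION & SPEC =====
-- Pre_ excludes exactly the inputs on which A raises KeyError: a candidate without a
-- 'score' key, or a tie at the maximal score in which some candidate attaining it lacks
-- a 'listing_count' key (B raises there too).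
def Pre_resolve_best_match_py (potential_matches : List (List (String × Int))) : Prop :=
  (∀ m ∈ potential_matches, (m.lookup "score").isSome) ∧
  (∀ m ∈ potential_matches,
    ((∀ m' ∈ potential_matches, pvScore m' ≤ pvScore m) ∧
      2 ≤ potential_matches.countP (fun m' => pvScore m' == pvScore m)) →
    (m.lookup "listing_count").isSome)
instance (potential_matches : List (List (String × Int))) : Decidable (Pre_resolve_best_match_py potential_matches) := by unfold Pre_resolve_best_match_py; infer_instance

def pvWitness_resolve_best_match_py : (List (List (String × Int))) :=
  [[("score", 3), ("listing_count", 2)], [("score", 3), ("listing_count", 5)]]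

def Spec_resolve_best_match_py (potential_matches : List (List (String × Int))) (out : Option ((List (String × Int)) × Bool)) : Prop := out = resolve_best_match_py_alt potential_matches
instance (potential_matches : List (List (String × Int))) (out : Option ((List (String × Int)) × Bool)) : Decidable (Spec_resolve_best_match_py potential_matches out) := by unfold Spec_resolve_best_match_py; infer_instance

-- ===== CLAIM (what is proved, stated in full; the proofs are below) =====
def Claim_equal_resolve_best_match_py : Prop := ∀ (potential_matches : List (List (String × Int))), Dom_resolve_best_match_py potential_matches → Pre_resolve_best_match_py potential_matches → Spec_resolve_best_match_py potential_matches (resolve_best_match_py potential_matches)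

-- ===== LEMMAS AND PROOFS =====

-- the running maximum of key over x :: xs
def pvFM (key : List (String × Int) → Int) (x : List (String × Int)) (xs : List (List (String × Int))) : Int :=
  xs.foldl (fun a m => max a (key m)) (key x)

lemma pvFM_le (key : List (String × Int) → Int) (x : List (String × Int)) (xs : List (List (String × Int))) :
    ∀ m ∈ x :: xs, key m ≤ pvFM key x xs := by
  have h := PySem.List.le_foldl_max_int xs key (key x)
  intro m hm
  rcases List.mem_cons.1 hm with rfl | hm
  · exact h.1
  · exact h.2 m hm

lemma pvFM_mem (key : List (String × Int) → Int) (x : List (String × Int)) (xs : List (List (String × Int))) :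
    ∃ m ∈ x :: xs, key m = pvFM key x xs := by
  have hmap : (xs.map key).foldl max (key x) = pvFM key x xs := by
    simp [pvFM, List.foldl_map]
  rcases PySem.List.foldl_max_mem (xs.map key) (key x) with h | h
  · exact ⟨x, List.mem_cons_self .., by rw [← hmap, h]⟩
  · rw [hmap] at h
    rcases List.mem_map.1 h with ⟨m, hm, hsc⟩
    exact ⟨m, List.mem_cons_of_mem _ hm, hsc⟩

lemma pvFilter_ne_nil (key : List (String × Int) → Int) (x : List (String × Int)) (xs : List (List (String × Int))) :
    (x :: xs).filter (fun m => key m == pvFM key x xs) ≠ [] := by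
  rcases pvFM_mem key x xs with ⟨m, hm, hsc⟩
  have : m ∈ (x :: xs).filter (fun m => key m == pvFM key x xs) :=
    List.mem_filter.2 ⟨hm, by simp [hsc]⟩
  intro h; rw [h] at this; exact (List.not_mem_nil) this

-- unfolding equation of PySem.List.insertBy
lemma pvInsertBy_cons (before : List (String × Int) → List (String × Int) → Bool)
    (y a : List (String × Int)) (l : List (List (String × Int))) :
    PySem.List.insertBy before y (a :: l) =
      if before y a then y :: a :: l else a :: PySem.List.insertBy before y l := rfl

-- insertBy passes over a prefix it never inserts before
lemma pvInsertBy_skip (before : List (String × Int) → List (String × Int) → Bool)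
    (y : List (String × Int)) (F S : List (List (String × Int)))
    (h : ∀ f ∈ F, before y f = false) :
    PySem.List.insertBy before y (F ++ S) = F ++ PySem.List.insertBy before y S := by
  induction F with
  | nil => rfl
  | cons f F ih =>
      have hf : before y f = false := h f (List.mem_cons_self ..)
      simp only [List.cons_append, pvInsertBy_cons, hf, Bool.false_eq_true, if_false]
      rw [ih (fun g hg => h g (List.mem_cons_of_mem _ hg))]

-- sorted over an appended element is an insertion into the sorted list
lemma pvSorted_append (key : List (String × Int) → Int) (ys : List (List (String × Int))) (y : List (String × Int)) :
    PySem.List.sorted (ys ++ [y]) key true =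
      PySem.List.insertBy (fun a b => decide (key b < key a)) y (PySem.List.sorted ys key true) := by
  rw [PySem.List.sorted_rev_eq_foldl_insertBy, PySem.List.sorted_rev_eq_foldl_insertBy,
    List.foldl_append, List.foldl_cons, List.foldl_nil]

-- PARTITION / STABILITY: a stable descending sort by key puts the candidates attaining
-- an upper bound M first, in their original order, followed by the sorted rest
lemma pvPart (key : List (String × Int) → Int) (M : Int) (xs : List (List (String × Int)))
    (hub : ∀ y ∈ xs, key y ≤ M) :
    PySem.List.sorted xs key true =
      xs.filter (fun y => key y == M) ++
        PySem.List.sorted (xs.filter (fun y => !(key y == M))) key true := by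
  induction xs using List.reverseRecOn with
  | nil => rfl
  | append_singleton ys y ih =>
      have hub' : ∀ z ∈ ys, key z ≤ M := fun z hz => hub z (List.mem_append_left _ hz)
      have hyM : key y ≤ M := hub y (List.mem_append_right _ (List.mem_cons_self ..))
      rw [pvSorted_append, ih hub']
      set F := ys.filter (fun y => key y == M) with hF
      set S := PySem.List.sorted (ys.filter (fun y => !(key y == M))) key true with hS
      have hFkey : ∀ f ∈ F, key f = M := by
        intro f hf
        have := (List.mem_filter.1 (hF ▸ hf)).2
        simpa using this
      have hSkey : ∀ s ∈ S, key s < M := by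
        intro s hs
        have hs' : s ∈ ys.filter (fun y => !(key y == M)) :=
          (PySem.List.mem_sorted _ _ _ _).1 (hS ▸ hs)
        have h1 := (List.mem_filter.1 hs').2
        have h2 := hub' s (List.mem_filter.1 hs').1
        simp only [Bool.not_eq_eq_eq_not, Bool.not_true, beq_eq_false_iff_ne, ne_eq] at h1
        omega
      by_cases hy : key y = M
      · -- a new maximal element: it is appended to F, S is unchanged
        have hskip : ∀ f ∈ F, (decide (key f < key y)) = false := by
          intro f hf; rw [hFkey f hf, hy]; simp
        rw [pvInsertBy_skip _ _ _ _ hskip]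
        have hins : PySem.List.insertBy (fun a b => decide (key b < key a)) y S = y :: S := by
          cases hScases : S with
          | nil => rfl
          | cons s t =>
              have : key s < key y := by
                have := hSkey s (by rw [hScases]; exact List.mem_cons_self ..)
                omega
              rw [pvInsertBy_cons]
              simp [this]
        rw [hins]
        rw [List.filter_append, List.filter_append]
        simp [hy, hF, hS]
      · -- a non-maximal element: F is unchanged, y is inserted into S
        have hylt : key y < M := lt_of_le_of_ne hyM hy
        have hskip : ∀ f ∈ F, (decide (key f < key y)) = false := by
          intro f hf; rw [hFkey f hf]; simp; omega
        have hy1 : (key y == M) = false := by simpa using hy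
        rw [pvInsertBy_skip _ _ _ _ hskip, List.filter_append, List.filter_append]
        simp only [List.filter_cons, List.filter_nil, hy1, Bool.not_false, Bool.false_eq_true,
          if_false, if_true, List.append_nil]
        rw [pvSorted_append, ← hF, ← hS]

-- the while-loop count over a maximal prefix followed by non-maximal elements
lemma pvCountTop_spec (M : Int) (F S : List (List (String × Int)))
    (hF : ∀ f ∈ F, pvScore f = M) (hS : ∀ s ∈ S, pvScore s ≠ M) :
    pvCountTop M (F ++ S) = F.length := by
  induction F with
  | nil =>
      cases S with
      | nil => rfl
      | cons s t =>
          have : pvScore s ≠ M := hS s (List.mem_cons_self ..)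
          simp [pvCountTop, this]
  | cons f F ih =>
      have h1 : pvScore f = M := hF f (List.mem_cons_self ..)
      simp only [List.cons_append, pvCountTop, h1, beq_self_eq_true, if_true, List.length_cons]
      rw [ih (fun g hg => hF g (List.mem_cons_of_mem _ hg))]
      omega

-- the folder inside PySem.List.max?
def pvMStep (key : List (String × Int) → Int)
    (acc : Option (List (String × Int))) (x : List (String × Int)) : Option (List (String × Int)) :=
  match acc with
  | none => some x
  | some m => if key m < key x then some x else some m

lemma pvMStep_const (key : List (String × Int) → Int) (m : List (String × Int))
    (t : List (List (String × Int))) (h : ∀ y ∈ t, ¬ key m < key y) :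
    t.foldl (pvMStep key) (some m) = some m := by
  induction t with
  | nil => rfl
  | cons a t ih =>
      have ha : ¬ key m < key a := h a (List.mem_cons_self ..)
      simp only [List.foldl_cons, pvMStep, ha, if_false]
      exact ih (fun y hy => h y (List.mem_cons_of_mem _ hy))

-- max? with a key returns the FIRST element attaining the maximum
lemma pvMaxFirst (key : List (String × Int) → Int) (M : Int) :
    ∀ (t : List (List (String × Int))) (acc : Option (List (String × Int))),
      (∀ m, acc = some m → key m < M) → (∀ y ∈ t, key y ≤ M) →
      ∀ f r, t.filter (fun y => key y == M) = f :: r →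
      t.foldl (pvMStep key) acc = some f := by
  intro t
  induction t with
  | nil => intro acc _ _ f r h; simp at h
  | cons x t ih =>
      intro acc hacc hub f r hfil
      have hxM : key x ≤ M := hub x (List.mem_cons_self ..)
      by_cases hx : key x = M
      · -- x is the first maximal element: acc becomes some x and never changes
        have hfx : f = x := by
          rw [List.filter_cons] at hfil
          simp only [hx, beq_self_eq_true, if_true] at hfil
          exact (List.cons.injEq .. ▸ hfil).1.symm
        have hstep : pvMStep key acc x = some x := by
          cases acc with
          | none => rfl
          | some m =>
              have hmM := hacc m rfl
              have hlt : key m < key x := by omega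
              show (if key m < key x then some x else some m) = some x
              rw [if_pos hlt]
        rw [List.foldl_cons, hstep, hfx]
        exact pvMStep_const key x t (by
          intro y hy
          have := hub y (List.mem_cons_of_mem _ hy)
          omega)
      · -- x is not maximal: the accumulator key stays below M
        have hfil' : t.filter (fun y => key y == M) = f :: r := by
          rw [List.filter_cons] at hfil
          simpa [hx] using hfil
        rw [List.foldl_cons]
        apply ih (pvMStep key acc x) _ (fun y hy => hub y (List.mem_cons_of_mem _ hy)) f r hfil'
        intro m hm
        cases acc with
        | none =>
            simp only [pvMStep] at hm
            injection hm with h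
            subst h; omega
        | some m' =>
            have hm' := hacc m' rfl
            simp only [pvMStep] at hm
            split at hm <;> injection hm with h <;> subst h
            · omega
            · exact hm'

lemma pvMax?_eq_foldl (key : List (String × Int) → Int) (l : List (List (String × Int))) :
    PySem.List.max? l (fun x => key x) = l.foldl (pvMStep key) none := by
  simp only [PySem.List.max?]
  apply PySem.List.foldl_congr_mem
  intro acc x _
  cases acc <;> rfl

-- ===== VERDICT (by name: the statement is the Claim_ definition above) =====
theorem resolve_best_match_py_spec : Claim_equal_resolve_best_match_py := by
  intro pm _ _
  unfold Spec_resolve_best_match_py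
  cases pm with
  | nil => rfl
  | cons x xs =>
      have hms : (match PySem.List.max? ((x :: xs).map (fun m => pvScore m)) (fun v => v) with
          | some v => v | none => 0) = pvFM pvScore x xs := by
        rw [List.map_cons, PySem.List.max?_id_cons]
        simp [pvFM, List.foldl_map]
      set M := pvFM pvScore x xs with hM
      set F := (x :: xs).filter (fun m => pvScore m == M) with hFdef
      have hFne : F ≠ [] := pvFilter_ne_nil pvScore x xs
      obtain ⟨f, ftail, hFcons⟩ : ∃ f t, F = f :: t := by
        cases hc : F with
        | nil => exact absurd hc hFne
        | cons a t => exact ⟨a, t, rfl⟩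
      set S := PySem.List.sorted ((x :: xs).filter (fun y => !(pvScore y == M))) (fun m => pvScore m) true with hSdef
      have hpart : PySem.List.sorted (x :: xs) (fun m => pvScore m) true = f :: (ftail ++ S) := by
        have h := pvPart (fun m => pvScore m) M (x :: xs) (pvFM_le pvScore x xs)
        rw [h, ← hFdef, ← hSdef, hFcons]; rfl
      have hFkey : ∀ m ∈ F, pvScore m = M := by
        intro m hm; have := (List.mem_filter.1 (hFdef ▸ hm)).2; simpa using this
      have hSkey : ∀ s ∈ S, pvScore s ≠ M := by
        intro s hs
        have hs' := (PySem.List.mem_sorted _ _ _ _).1 (hSdef ▸ hs)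
        have := (List.mem_filter.1 hs').2
        simpa using this
      have htop : pvScore f = M := hFkey f (hFcons ▸ List.mem_cons_self ..)
      have hcount : pvCountTop (pvScore f) (ftail ++ S) = ftail.length := by
        rw [htop]
        exact pvCountTop_spec M ftail S
          (fun g hg => hFkey g (hFcons ▸ List.mem_cons_of_mem _ hg)) hSkey
      have htake : (f :: (ftail ++ S)).take (1 + pvCountTop (pvScore f) (ftail ++ S)) = F := by
        rw [hcount, Nat.add_comm, List.take_succ_cons, List.take_left, hFcons]
      rw [resolve_best_match_py, resolve_best_match_py_alt]
      simp only [List.isEmpty_cons, Bool.false_eq_true, if_false, hms, ← hFdef, hpart, htake]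
      cases hft : ftail with
      | nil =>
          have hlen : F.length = 1 := by rw [hFcons, hft]; rfl
          have hk : 1 + pvCountTop (pvScore f) (ftail ++ S) = 1 := by
            rw [hcount, hft]; rfl
          rw [hft] at hk
          simp only [List.nil_append] at hk
          have hc0 : pvCountTop (pvScore f) S = 0 := by omega
          simp [hFcons, hft, hc0]
      | cons g gs =>
          have hlen : ¬ F.length = 1 := by rw [hFcons, hft]; simp
          have hk : ¬ (1 + pvCountTop (pvScore f) (ftail ++ S) = 1) := by
            rw [hcount, hft]; simp
          rw [hft] at hk
          simp only [hlen, if_false, hk]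
          -- the tie-breaking pass: max? with key = first element of the stable
          -- descending sort by listing_count
          set M' := pvFM pvLc f ftail with hM'
          rw [hft] at hFcons
          have hM'2 : M' = pvFM pvLc f (g :: gs) := by rw [hM', hft]
          have hF'ne : F.filter (fun y => pvLc y == M') ≠ [] := by
            rw [hFcons, hM'2]
            exact pvFilter_ne_nil pvLc f (g :: gs)
          obtain ⟨f', r', hF'cons⟩ : ∃ a t, F.filter (fun y => pvLc y == M') = a :: t := by
            cases hc : F.filter (fun y => pvLc y == M') with
            | nil => exact absurd hc hF'ne
            | cons a t => exact ⟨a, t, rfl⟩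
          have hub' : ∀ y ∈ F, pvLc y ≤ M' := by
            rw [hFcons, hM'2]
            exact pvFM_le pvLc f (g :: gs)
          have hA : PySem.List.max? F (fun x => pvLc x) = some f' := by
            rw [pvMax?_eq_foldl]
            exact pvMaxFirst pvLc M' F none (by intro m h; cases h) hub' f' r' hF'cons
          have hB : PySem.List.sorted F (fun x => pvLc x) true =
              f' :: (r' ++ PySem.List.sorted (F.filter (fun y => !(pvLc y == M'))) (fun x => pvLc x) true) := by
            have h := pvPart (fun x => pvLc x) M' F hub'
            rw [h, hF'cons]; rfl
          rw [hA, hB]
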